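-- pv_equiv track=rewrite | github.com/trevorgarr/aoc2024 | day6/day6.py | part_two
-- ===== SOURCE A (Python) =====
-- def find_direction(grid):
--     direction = "up"
--     for idx_r, row in enumerate(grid):
--         for idx_c, col in enumerate(row):
--             if grid[idx_r][idx_c] == "^":
--                 direction = "up"
--                 return direction, idx_r, idx_c
--             if grid[idx_r][idx_c] == ">":
--                 direction = "right"
--                 return direction, idx_r, idx_c
--             if grid[idx_r][idx_c] == "<":
--                 direction = "left"
--                 return direction, idx_r, idx_c
--             if grid[idx_r][idx_c] == "v":
--                 direction = "down"
--                 return direction, idx_r, idx_c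
--     return direction
--
-- def part_two(grid):
--     num_cycles = 0
--     num_rows = len(grid)
--     num_cols = len(grid[0])
--
--     for idx_r, row in enumerate(grid):
--         for idx_c, col in enumerate(row):
--             if grid[idx_r][idx_c] == "^" or grid[idx_r][idx_c] == "X":
--                 seen = set()
--                 direction, rs_idx, cs_idx = find_direction(grid)
--                 before = grid[idx_r][idx_c]
--                 grid[idx_r][idx_c] = "#"
--                 while 0 <= rs_idx < num_rows and 0 <= cs_idx < num_cols:
--                     seen.add((direction, rs_idx, cs_idx))
--                     if grid[rs_idx][cs_idx] == "#":
--                         if direction == "up":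
--                             direction = "right"
--                             rs_idx += 1
--                         elif direction == "left":
--                             cs_idx += 1
--                             direction = "up"
--                         elif direction == "right":
--                             cs_idx -= 1
--                             direction = "down"
--                         elif direction == "down":
--                             rs_idx -= 1
--                             direction = "left"
--
--                     if direction == "up":
--                         rs_idx -= 1
--                     elif direction == "left":
--                         cs_idx -= 1
--                     elif direction == "right":
--                         cs_idx += 1
--                     elif direction == "down":
--                         rs_idx += 1
--                     if (direction, rs_idx, cs_idx) in seen:
--                         num_cycles += 1
--                         break
--                 grid[idx_r][idx_c] = before
--     return num_cycles
-- ===== SOURCE B (Python) =====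
-- # Direction is an integer 0..3 (up,right,down,left) with delta tables and (d+1)%4 turns
-- # instead of A's string if-chains; candidates are collected once by a comprehension and
-- # each is judged by a pure boolean walk bounded by 4*rows*cols steps (pigeonhole: more
-- # than the number of distinct states, so a walk that long must loop) instead of A's
-- # mutate-the-grid / seen-set loop.  A mutates the grid only temporarily and restores it,
-- # so the return value is what is compared.
--
-- _ARROWS = {"^": 0, ">": 1, "v": 2, "<": 3}
-- _DR = (-1, 0, 1, 0)
-- _DC = (0, 1, 0, -1)
--
--
-- def _start(grid):
--     for r, row in enumerate(grid):
--         for c, cell in enumerate(row):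
--             d = _ARROWS.get(cell)
--             if d is not None:
--                 return d, r, c
--     return None
--
--
-- def part_two(grid):
--     R, C = len(grid), len(grid[0])
--     cands = [(r, c) for r, row in enumerate(grid)
--              for c, cell in enumerate(row) if cell in ("^", "X")]
--     if not cands:
--         return 0
--     d0, r0, c0 = _start(grid)
--     limit = 4 * R * C
--
--     def loops(br, bc):
--         d, r, c = d0, r0, c0
--         for _ in range(limit + 1):
--             if not (0 <= r < R and 0 <= c < C):
--                 return False
--             if grid[r][c] == "#" or (r == br and c == bc):
--                 r -= _DR[d]
--                 c -= _DC[d]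
--                 d = (d + 1) % 4
--             r += _DR[d]
--             c += _DC[d]
--         return True
--
--     return sum(loops(br, bc) for br, bc in cands)
-- ===== Notes on version B (the rewrite author's own statement) =====
-- stated objective: alternative
-- what changed: B replaces A's string directions and per-direction if-chains by an integer direction 0..3 with delta tables and (d+1)%4 turns, collects the candidate cells once into a list by a comprehension instead of testing inside nested loops, never mutates the grid (the candidate obstacle is tested positionally), and detects a loop by bounding the walk at 4*rows*cols steps (pigeonhole over the distinct (direction,row,col) states) instead of maintaining a seen-set.
-- outside the precondition, e.g. on part_two([]): A raises IndexError, B raises IndexError; on part_two([['X']]): A raises ValueError, B raises TypeError; on part_two([['X', '.', '#'], ['X', '>']]): A raises IndexError, B raises IndexError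
import Mathlib
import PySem

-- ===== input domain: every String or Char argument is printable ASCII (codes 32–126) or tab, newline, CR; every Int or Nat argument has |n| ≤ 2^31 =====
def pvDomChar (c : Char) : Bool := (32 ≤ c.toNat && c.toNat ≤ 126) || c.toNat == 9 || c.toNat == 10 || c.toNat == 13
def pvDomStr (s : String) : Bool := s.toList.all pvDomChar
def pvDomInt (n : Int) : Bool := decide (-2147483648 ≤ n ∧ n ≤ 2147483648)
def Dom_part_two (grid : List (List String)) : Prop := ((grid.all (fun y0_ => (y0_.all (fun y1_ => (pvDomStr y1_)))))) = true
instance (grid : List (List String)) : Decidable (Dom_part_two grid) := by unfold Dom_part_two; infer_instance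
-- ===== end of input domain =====

-- B uses integer directions 0..3 with delta tables and (d+1)%4 turns instead of A's string
-- if-chains, gathers the candidate cells once into a list, never mutates the grid (the
-- candidate obstacle is tested positionally) and detects a loop by bounding the walk at
-- 4*rows*cols steps (more than the number of distinct states) instead of a seen-set;
-- A mutates the grid only temporarily and restores it, so the equivalence is about the return value.

-- grid[r][c] (Python indexing, shared by both ports)
abbrev pvGetCell (g : List (List String)) (r c : Int) : String :=
  PySem.List.pyGetD (PySem.List.pyGetD g r []) c ""
abbrev pvInB (R C : Int) (s : String × Int × Int) : Prop :=
  0 ≤ s.2.1 ∧ s.2.1 < R ∧ 0 ≤ s.2.2 ∧ s.2.2 < C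

-- ===== PORT A =====

-- find_direction: first arrow cell in scan order (none = the bare-"up" return, whose unpacking raises ValueError)
def fdRow (r : Int) : Int → List String → Option (String × Int × Int)
  | _, [] => none
  | c, cell :: rest =>
    if cell = "^" then some ("up", r, c)
    else if cell = ">" then some ("right", r, c)
    else if cell = "<" then some ("left", r, c)
    else if cell = "v" then some ("down", r, c)
    else fdRow r (c + 1) rest

def fdGrid : Int → List (List String) → Option (String × Int × Int)
  | _, [] => none
  | r, row :: rest =>
    match fdRow r 0 row with
    | some s => some s
    | none => fdGrid (r + 1) rest

def findDirection (g : List (List String)) : Option (String × Int × Int) := fdGrid 0 g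

-- grid[br][bc] = "#"
def pvObstruct (g : List (List String)) (br bc : Nat) : List (List String) :=
  g.set br ((g.getD br []).set bc "#")

-- the while loop of A: seen-set loop detection.  fuel is only a termination device: each
-- iteration adds a NEW in-bounds state to seen, so at most 4·R·C iterations can happen and
-- the supplied fuel 4·R·C+1 is never exhausted.
def walkA (g2 : List (List String)) (R C : Int) :
    Nat → String × Int × Int → PySem.Set (String × Int × Int) → Int
  | 0, _, _ => 0
  | fuel + 1, s, seen =>
    if pvInB R C s then
      let seen1 := PySem.Set.add seen s
      let t : String × Int × Int :=
        if pvGetCell g2 s.2.1 s.2.2 = "#" then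
          if s.1 = "up" then ("right", s.2.1 + 1, s.2.2)
          else if s.1 = "left" then ("up", s.2.1, s.2.2 + 1)
          else if s.1 = "right" then ("down", s.2.1, s.2.2 - 1)
          else if s.1 = "down" then ("left", s.2.1 - 1, s.2.2)
          else s
        else s
      let m : String × Int × Int :=
        if t.1 = "up" then (t.1, t.2.1 - 1, t.2.2)
        else if t.1 = "left" then (t.1, t.2.1, t.2.2 - 1)
        else if t.1 = "right" then (t.1, t.2.1, t.2.2 + 1)
        else (if t.1 = "down" then (t.1, t.2.1 + 1, t.2.2) else t)
      if PySem.Set.contains seen1 m then 1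
      else walkA g2 R C fuel m seen1
    else 0

def aCandidate (g : List (List String)) (R C : Int) (fuel : Nat) (br bc : Nat) (cell : String) : Int :=
  if cell = "^" ∨ cell = "X" then
    match findDirection g with
    | some s => walkA (pvObstruct g br bc) R C fuel s PySem.Set.empty
    | none => 0  -- Python unpacks the bare "up": ValueError; excluded by Pre_
  else 0

def aRow (g : List (List String)) (R C : Int) (fuel : Nat) (br : Nat) : Nat → List String → Int
  | _, [] => 0
  | bc, cell :: rest => aCandidate g R C fuel br bc cell + aRow g R C fuel br (bc + 1) rest

def aGrid (g : List (List String)) (R C : Int) (fuel : Nat) : Nat → List (List String) → Int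
  | _, [] => 0
  | br, row :: rest => aRow g R C fuel br 0 row + aGrid g R C fuel (br + 1) rest

def part_two (grid : List (List String)) : Int :=
  match grid with
  | [] => 0  -- Python: len(grid[0]) raises IndexError; excluded by Pre_
  | row0 :: _ =>
    aGrid grid (grid.length : Int) (row0.length : Int) (4 * grid.length * row0.length + 1) 0 grid

-- ===== PORT B =====

-- _ARROWS.get(cell): direction as an integer 0..3 (up, right, down, left)
def arrowDir? (cell : String) : Option Int :=
  if cell = "^" then some 0
  else if cell = ">" then some 1
  else if cell = "v" then some 2
  else if cell = "<" then some 3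
  else none

-- _start: first arrow cell, as the first non-None of _ARROWS.get over the enumerated grid
def bStart (grid : List (List String)) : Option (Int × Int × Int) :=
  (PySem.List.enumerate grid).findSome? (fun p =>
    (PySem.List.enumerate p.2).findSome? (fun q =>
      (arrowDir? q.2).map (fun d => (d, p.1, q.1))))

def pvDR : List Int := [-1, 0, 1, 0]
def pvDC : List Int := [0, 1, 0, -1]

-- one loop body of `loops`: back off and turn right on an obstacle, then move
def bStep (grid : List (List String)) (br bc : Int) (s : Int × Int × Int) : Int × Int × Int :=
  let t : Int × Int × Int :=
    if pvGetCell grid s.2.1 s.2.2 = "#" ∨ (s.2.1 = br ∧ s.2.2 = bc) then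
      (PySem.Int.mod (s.1 + 1) 4,
       s.2.1 - PySem.List.pyGetD pvDR s.1 0,
       s.2.2 - PySem.List.pyGetD pvDC s.1 0)
    else s
  (t.1, t.2.1 + PySem.List.pyGetD pvDR t.1 0, t.2.2 + PySem.List.pyGetD pvDC t.1 0)

-- `loops`: does the walk stay in bounds for all of the first `n` states?
def bLoops (grid : List (List String)) (br bc R C : Int) : Nat → Int × Int × Int → Bool
  | 0, _ => true
  | k + 1, s =>
    if 0 ≤ s.2.1 ∧ s.2.1 < R ∧ 0 ≤ s.2.2 ∧ s.2.2 < C then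
      bLoops grid br bc R C k (bStep grid br bc s)
    else false

-- the candidate comprehension
def bCands (grid : List (List String)) : List (Int × Int) :=
  (PySem.List.enumerate grid).flatMap (fun p =>
    ((PySem.List.enumerate p.2).filter (fun q => q.2 == "^" || q.2 == "X")).map
      (fun q => (p.1, q.1)))

def part_two_alt (grid : List (List String)) : Int :=
  match grid with
  | [] => 0  -- Python: len(grid[0]) raises IndexError; excluded by Pre_
  | row0 :: _ =>
    let cands := bCands grid
    if cands.isEmpty then 0
    else
      match bStart grid with
      | none => 0  -- Python unpacks None: TypeError; excluded by Pre_
      | some s0 =>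
        (cands.map (fun p =>
          if bLoops grid p.1 p.2 (grid.length : Int) (row0.length : Int)
              (4 * grid.length * row0.length + 1) s0
          then (1 : Int) else 0)).sum

-- ===== PRECONDITION & SPEC =====
-- Pre_ excludes: the empty grid (len(grid[0]) raises IndexError); and, when a candidate cell
-- ("^" or "X") exists so that walks actually run: non-rectangular grids (the walk may index a
-- short row: IndexError) and grids with an "X" but no arrow (find_direction's bare-string
-- return makes the tuple unpacking raise ValueError).  Rectangularity over-approximates the
-- ragged grids on which the walk happens to raise.
def Pre_part_two (grid : List (List String)) : Prop :=
  grid ≠ [] ∧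
  ((∃ row ∈ grid, ∃ s ∈ row, s = "^" ∨ s = "X") →
    ((∀ row ∈ grid, row.length = (grid.headI).length) ∧
     ∃ row ∈ grid, ∃ s ∈ row, s = "^" ∨ s = ">" ∨ s = "<" ∨ s = "v"))
instance (grid : List (List String)) : Decidable (Pre_part_two grid) := by
  unfold Pre_part_two; infer_instance

def pvWitness_part_two : List (List String) := [["^", "."], [".", "#"]]

def Spec_part_two (grid : List (List String)) (out : Int) : Prop := out = part_two_alt grid
instance (grid : List (List String)) (out : Int) : Decidable (Spec_part_two grid out) := by unfold Spec_part_two; infer_instance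

-- ===== CLAIM (what is proved, stated in full; the proofs are below) =====
def Claim_equal_part_two : Prop := ∀ (grid : List (List String)), Dom_part_two grid → Pre_part_two grid → Spec_part_two grid (part_two grid)

-- ===== LEMMAS AND PROOFS =====

abbrev PvSt := String × Int × Int

def pvTurn (s : PvSt) : PvSt :=
  if s.1 = "up" then ("right", s.2.1 + 1, s.2.2)
  else if s.1 = "left" then ("up", s.2.1, s.2.2 + 1)
  else if s.1 = "right" then ("down", s.2.1, s.2.2 - 1)
  else if s.1 = "down" then ("left", s.2.1 - 1, s.2.2)
  else s

def pvMove (t : PvSt) : PvSt :=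
  if t.1 = "up" then (t.1, t.2.1 - 1, t.2.2)
  else if t.1 = "left" then (t.1, t.2.1, t.2.2 - 1)
  else if t.1 = "right" then (t.1, t.2.1, t.2.2 + 1)
  else (if t.1 = "down" then (t.1, t.2.1 + 1, t.2.2) else t)

def pvStep (obst : Int → Int → Bool) (s : PvSt) : PvSt :=
  pvMove (if obst s.2.1 s.2.2 then pvTurn s else s)

-- string direction → integer direction of B
def encD (d : String) : Int :=
  if d = "up" then 0 else if d = "right" then 1 else if d = "down" then 2 else 3

def encSt (s : PvSt) : Int × Int × Int := (encD s.1, s.2.1, s.2.2)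

def pvDirOK (s : PvSt) : Prop :=
  s.1 = "up" ∨ s.1 = "right" ∨ s.1 = "left" ∨ s.1 = "down"

def gwalkA (f : PvSt → PvSt) (R C : Int) : Nat → PvSt → PySem.Set PvSt → Int
  | 0, _, _ => 0
  | fuel + 1, s, seen =>
    if pvInB R C s then
      let seen1 := PySem.Set.add seen s
      let m := f s
      if PySem.Set.contains seen1 m then 1 else gwalkA f R C fuel m seen1
    else 0

lemma walkA_eq_gwalkA (g2 : List (List String)) (R C : Int) :
    ∀ fuel s seen, walkA g2 R C fuel s seen
      = gwalkA (pvStep (fun r c => pvGetCell g2 r c == "#")) R C fuel s seen := by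
  intro fuel
  induction fuel with
  | zero => intro s seen; rfl
  | succ n ih =>
    intro s seen
    simp only [walkA, gwalkA, pvStep, pvTurn, pvMove, beq_iff_eq, ih]

lemma pvGetCell_obstruct (g : List (List String)) (C' : Nat)
    (hrect : ∀ row ∈ g, row.length = C') (br bc : Nat)
    (hbr : br < g.length) (hbc : bc < C') (r c : Int)
    (hr0 : 0 ≤ r) (hr1 : r < (g.length : Int)) (hc0 : 0 ≤ c) (hc1 : c < (C' : Int)) :
    pvGetCell (pvObstruct g br bc) r c
      = if r = (br : Int) ∧ c = (bc : Int) then "#" else pvGetCell g r c := by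
  have hrowlen : ∀ (i : Nat) (h : i < g.length), (g[i]'h).length = C' := by
    intro i h; exact hrect _ (List.getElem_mem h)
  have hrn : r.toNat < g.length := by omega
  have hcn : c.toNat < C' := by omega
  have hget : g.getD br [] = g[br]'hbr := by
    simp [List.getD_eq_getElem?_getD, List.getElem?_eq_getElem hbr]
  show PySem.List.pyGetD
      (PySem.List.pyGetD (g.set br ((g.getD br []).set bc "#")) r []) c ""
    = if r = (br : Int) ∧ c = (bc : Int) then "#" else
        PySem.List.pyGetD (PySem.List.pyGetD g r []) c ""
  rw [PySem.List.pyGetD_eq_getElem _ _ hr0 (by simp only [List.length_set]; exact hr1)]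
  rw [PySem.List.pyGetD_eq_getElem g _ hr0 hr1]
  rw [List.getElem_set]
  by_cases hbrr : br = r.toNat
  · subst hbrr
    rw [if_pos rfl, hget]
    rw [PySem.List.pyGetD_eq_getElem _ _ hc0
      (by simp only [List.length_set]; rw [hrowlen _ hbr]; exact hc1)]
    rw [List.getElem_set]
    by_cases hbcc : bc = c.toNat
    · rw [if_pos hbcc, if_pos (by constructor <;> omega)]
    · have hne : ¬(r = (r.toNat : Int) ∧ c = (bc : Int)) := by
        intro hx
        exact hbcc (by omega)
      rw [if_neg hbcc, if_neg hne]
      rw [PySem.List.pyGetD_eq_getElem _ _ hc0 (by rw [hrowlen r.toNat hrn]; exact hc1)]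
  · have hne : ¬(r = (br : Int) ∧ c = (bc : Int)) := by
      intro hx
      exact hbrr (by omega)
    rw [if_neg hbrr, if_neg hne]

-- the positional obstacle test of B agrees with A's obstructed-grid test on in-bounds cells
lemma pvStep_obst_agree (g : List (List String)) (C' : Nat)
    (hrect : ∀ row ∈ g, row.length = C') (br bc : Nat)
    (hbr : br < g.length) (hbc : bc < C') (s : PvSt)
    (hs : pvInB (g.length : Int) (C' : Int) s) :
    pvStep (fun r c => pvGetCell g r c == "#" || (r == (br : Int) && c == (bc : Int))) s
      = pvStep (fun r c => pvGetCell (pvObstruct g br bc) r c == "#") s := by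
  obtain ⟨hr0, hr1, hc0, hc1⟩ := hs
  unfold pvStep
  beta_reduce
  rw [pvGetCell_obstruct g C' hrect br bc hbr hbc s.2.1 s.2.2 hr0 hr1 hc0 hc1]
  congr 1
  by_cases h1 : s.2.1 = (br : Int) <;> by_cases h2 : s.2.2 = (bc : Int) <;>
    by_cases hsh : pvGetCell g s.2.1 s.2.2 = "#" <;>
    simp [h1, h2, hsh]

-- directions stay among the four strings
lemma pvStep_dir (obst : Int → Int → Bool) (s : PvSt) (hd : pvDirOK s) :
    pvDirOK (pvStep obst s) := by
  obtain ⟨d, r, c⟩ := s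
  rcases hd with h | h | h | h <;> subst h <;>
    simp [pvDirOK, pvStep, pvTurn, pvMove] <;> split_ifs <;> simp_all

lemma pvIter_dir (f : PvSt → PvSt) (obst : Int → Int → Bool) (hf : f = pvStep obst)
    (s0 : PvSt) (hd : pvDirOK s0) : ∀ n, pvDirOK (f^[n] s0) := by
  subst hf
  intro n
  induction n with
  | zero => simpa using hd
  | succ n ih =>
    rw [Function.iterate_succ_apply']
    exact pvStep_dir obst _ ih

def pvIcc (n : Nat) : Finset Int := ((List.range n).map (fun k : Nat => (k : Int))).toFinset

lemma pvIcc_card (n : Nat) : (pvIcc n).card = n := by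
  rw [pvIcc, List.toFinset_card_of_nodup
    (List.nodup_range.map (fun a b h => by omega))]
  simp

lemma mem_pvIcc (n : Nat) (x : Int) : x ∈ pvIcc n ↔ 0 ≤ x ∧ x < (n : Int) := by
  simp only [pvIcc, List.mem_toFinset, List.mem_map, List.mem_range]
  constructor
  · rintro ⟨k, hk, rfl⟩
    constructor <;> omega
  · rintro ⟨h0, h1⟩
    exact ⟨x.toNat, by omega, by omega⟩

def pvT (R' C' : Nat) : Finset PvSt :=
  (["up", "right", "left", "down"].toFinset) ×ˢ (pvIcc R' ×ˢ pvIcc C')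

lemma pvT_card (R' C' : Nat) : (pvT R' C').card = 4 * R' * C' := by
  rw [pvT, Finset.card_product, Finset.card_product, pvIcc_card, pvIcc_card]
  have h4 : (["up", "right", "left", "down"].toFinset).card = 4 := by decide
  rw [h4]
  ring

lemma mem_pvT (R' C' : Nat) (s : PvSt) (hd : pvDirOK s)
    (hin : pvInB (R' : Int) (C' : Int) s) : s ∈ pvT R' C' := by
  obtain ⟨d, r, c⟩ := s
  obtain ⟨h1, h2, h3, h4⟩ := hin
  dsimp only at h1 h2 h3 h4
  simp only [pvT, Finset.mem_product, List.mem_toFinset, mem_pvIcc]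
  refine ⟨?_, ⟨h1, h2⟩, ⟨h3, h4⟩⟩
  rcases hd with h | h | h | h <;> (rw [show (d, r, c).1 = d from rfl] at h; subst h; simp)

lemma pvCount_le (f : PvSt → PvSt) (R C : Int) (T : Finset PvSt) (s0 : PvSt)
    (hmem : ∀ n, pvInB R C (f^[n] s0) → f^[n] s0 ∈ T) (m : Nat)
    (hdist : ∀ i j, i < j → j ≤ m → f^[i] s0 ≠ f^[j] s0)
    (hinb : ∀ j, j < m → pvInB R C (f^[j] s0)) : m ≤ T.card := by
  have := Finset.card_le_card_of_injOn (fun j => f^[j] s0)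
    (fun j hj => hmem j (hinb j (Finset.mem_range.mp hj)))
    (by
      intro i hi j hj heq
      by_contra hne
      rcases Nat.lt_or_ge i j with h | h
      · exact hdist i j h (by have := Finset.mem_range.mp hj; omega) heq
      · exact hdist j i (by omega) (by have := Finset.mem_range.mp hi; omega) heq.symm)
    (s := Finset.range m) (t := T)
  simpa using this

lemma pvIter_cycle {α : Type} (f : α → α) (s0 : α) (m j0 : Nat) (hj0 : j0 ≤ m)
    (hcyc : f^[m + 1] s0 = f^[j0] s0) :
    ∀ n, ∃ i, i ≤ m ∧ f^[n] s0 = f^[i] s0 := by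
  intro n
  induction n with
  | zero => exact ⟨0, Nat.zero_le _, rfl⟩
  | succ n ih =>
    obtain ⟨i, him, hei⟩ := ih
    rcases Nat.lt_or_ge i m with h | h
    · refine ⟨i + 1, h, ?_⟩
      calc f^[n + 1] s0 = f (f^[n] s0) := Function.iterate_succ_apply' f n s0
        _ = f (f^[i] s0) := by rw [hei]
        _ = f^[i + 1] s0 := (Function.iterate_succ_apply' f i s0).symm
    · have hi : i = m := by omega
      refine ⟨j0, hj0, ?_⟩
      calc f^[n + 1] s0 = f (f^[n] s0) := Function.iterate_succ_apply' f n s0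
        _ = f (f^[m] s0) := by rw [hei, hi]
        _ = f^[m + 1] s0 := (Function.iterate_succ_apply' f m s0).symm
        _ = f^[j0] s0 := hcyc

lemma gwalkA_char (f : PvSt → PvSt) (R C : Int) (T : Finset PvSt) (s0 : PvSt)
    (hmem : ∀ n, pvInB R C (f^[n] s0) → f^[n] s0 ∈ T) :
    ∀ fuel m (seen : PySem.Set PvSt),
      m + fuel = T.card + 1 →
      (∀ x, x ∈ seen ↔ ∃ j, j < m ∧ f^[j] s0 = x) →
      (∀ i j, i < j → j ≤ m → f^[i] s0 ≠ f^[j] s0) →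
      (∀ j, j < m → pvInB R C (f^[j] s0)) →
      gwalkA f R C fuel (f^[m] s0) seen
        = (if ∀ j ∈ Finset.Icc m T.card, pvInB R C (f^[j] s0) then 1 else 0) := by
  intro fuel
  induction fuel with
  | zero =>
    intro m seen hfuel _ hdist hinb
    exfalso
    have := pvCount_le f R C T s0 hmem m hdist hinb
    omega
  | succ n ih =>
    intro m seen hfuel hseen hdist hinb
    have hmle : m ≤ T.card := by
      have := pvCount_le f R C T s0 hmem m hdist hinb
      omega
    by_cases hg : pvInB R C (f^[m] s0)
    · have hnext : f (f^[m] s0) = f^[m + 1] s0 := (Function.iterate_succ_apply' f m s0).symm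
      have hseen1 : ∀ x, x ∈ PySem.Set.add seen (f^[m] s0) ↔ ∃ j, j < m + 1 ∧ f^[j] s0 = x := by
        intro x
        rw [PySem.Set.mem_add]
        constructor
        · rintro (hx | hx)
          · obtain ⟨j, hj, he⟩ := (hseen x).mp hx; exact ⟨j, by omega, he⟩
          · exact ⟨m, by omega, hx.symm⟩
        · rintro ⟨j, hj, he⟩
          rcases Nat.lt_or_ge j m with h | h
          · exact Or.inl ((hseen x).mpr ⟨j, h, he⟩)
          · have : j = m := by omega
            subst this; exact Or.inr he.symm
      by_cases hc : f^[m + 1] s0 ∈ PySem.Set.add seen (f^[m] s0)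
      · obtain ⟨j0, hj0, hej0⟩ := (hseen1 _).mp hc
        have hcyc := pvIter_cycle f s0 m j0 (by omega) hej0.symm
        have hall : ∀ j ∈ Finset.Icc m T.card, pvInB R C (f^[j] s0) := by
          intro j _
          obtain ⟨i, him, hei⟩ := hcyc j
          rw [hei]
          rcases Nat.lt_or_ge i m with h | h
          · exact hinb i h
          · have : i = m := by omega
            subst this; exact hg
        rw [if_pos hall]
        simp only [gwalkA, if_pos hg]
        rw [hnext]
        rw [if_pos (by rw [PySem.Set.contains_iff]; exact hc)]
      · have hres : gwalkA f R C (n + 1) (f^[m] s0) seen = gwalkA f R C n (f^[m + 1] s0) (PySem.Set.add seen (f^[m] s0)) := by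
          simp only [gwalkA, if_pos hg]
          rw [hnext]
          rw [if_neg (by rw [PySem.Set.contains_iff]; exact hc)]
        rw [hres]
        rw [ih (m + 1) _ (by omega) hseen1
          (by
            intro i j hij hjm
            rcases Nat.lt_or_ge j (m + 1) with h | h
            · exact hdist i j hij (by omega)
            · have : j = m + 1 := by omega
              subst this
              intro he
              exact hc ((hseen1 _).mpr ⟨i, by omega, he⟩))
          (by
            intro j hj
            rcases Nat.lt_or_ge j m with h | h
            · exact hinb j h
            · have : j = m := by omega
              subst this; exact hg)]
        refine if_congr ?_ rfl rfl
        constructor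
        · intro h j hj
          rw [Finset.mem_Icc] at hj
          rcases Nat.lt_or_ge m j with hmj | hmj
          · exact h j (Finset.mem_Icc.mpr ⟨by omega, hj.2⟩)
          · have : j = m := by omega
            subst this; exact hg
        · intro h j hj
          rw [Finset.mem_Icc] at hj
          exact h j (Finset.mem_Icc.mpr ⟨by omega, hj.2⟩)
    · rw [if_neg (by
        intro hall
        exact hg (hall m (Finset.mem_Icc.mpr ⟨le_refl _, hmle⟩)))]
      simp only [gwalkA, if_neg hg]

-- B's integer step is A's string step through the encoding (positional obstacle test on both sides)
lemma pvTab :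
    PySem.Int.mod 1 4 = 1 ∧ PySem.Int.mod 2 4 = 2 ∧ PySem.Int.mod 3 4 = 3 ∧ PySem.Int.mod 4 4 = 0
    ∧ PySem.List.pyGetD pvDR 0 0 = -1 ∧ PySem.List.pyGetD pvDR 1 0 = 0
    ∧ PySem.List.pyGetD pvDR 2 0 = 1 ∧ PySem.List.pyGetD pvDR 3 0 = 0
    ∧ PySem.List.pyGetD pvDC 0 0 = 0 ∧ PySem.List.pyGetD pvDC 1 0 = 1
    ∧ PySem.List.pyGetD pvDC 2 0 = 0 ∧ PySem.List.pyGetD pvDC 3 0 = -1 := by decide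

lemma bStep_ob (g : List (List String)) (br bc r c : Int)
    (hob : pvGetCell g r c = "#" ∨ (r = br ∧ c = bc)) :
    bStep g br bc (0, r, c) = (1, r + 1, c + 1)
    ∧ bStep g br bc (1, r, c) = (2, r + 1, c - 1)
    ∧ bStep g br bc (3, r, c) = (0, r - 1, c + 1)
    ∧ bStep g br bc (2, r, c) = (3, r - 1, c - 1) := by
  obtain ⟨m1, m2, m3, m4, a0, a1, a2, a3, b0, b1, b2, b3⟩ := pvTab
  refine ⟨?_, ?_, ?_, ?_⟩ <;>
    · simp only [bStep]
      rw [if_pos hob]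
      norm_num [m1, m2, m3, m4, a0, a1, a2, a3, b0, b1, b2, b3]
      try constructor <;> omega

lemma bStep_noob (g : List (List String)) (br bc r c : Int)
    (hob : ¬(pvGetCell g r c = "#" ∨ (r = br ∧ c = bc))) :
    bStep g br bc (0, r, c) = (0, r - 1, c)
    ∧ bStep g br bc (1, r, c) = (1, r, c + 1)
    ∧ bStep g br bc (3, r, c) = (3, r, c - 1)
    ∧ bStep g br bc (2, r, c) = (2, r + 1, c) := by
  obtain ⟨m1, m2, m3, m4, a0, a1, a2, a3, b0, b1, b2, b3⟩ := pvTab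
  refine ⟨?_, ?_, ?_, ?_⟩ <;>
    · simp only [bStep]
      rw [if_neg hob]
      norm_num [a0, a1, a2, a3, b0, b1, b2, b3]
      try constructor <;> omega

lemma bStep_enc (g : List (List String)) (br bc : Int) (s : PvSt) (hd : pvDirOK s) :
    bStep g br bc (encSt s)
      = encSt (pvStep (fun r c => pvGetCell g r c == "#" || (r == br && c == bc)) s) := by
  obtain ⟨d, r, c⟩ := s
  simp only [pvDirOK] at hd
  by_cases hob : pvGetCell g r c = "#" ∨ (r = br ∧ c = bc)
  · have hpos : (pvGetCell g r c == "#" || (r == br && c == bc)) = true := by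
      rcases hob with h | ⟨h1, h2⟩ <;> simp [*]
    have hstep : pvStep (fun r c => pvGetCell g r c == "#" || (r == br && c == bc)) (d, r, c)
        = pvMove (pvTurn (d, r, c)) := by
      simp only [pvStep, hpos, if_true]
    rw [hstep]
    rcases hd with h | h | h | h <;> subst h
    · rw [show encSt ("up", r, c) = ((0:Int), r, c) from rfl, (bStep_ob g br bc r c hob).1]; rfl
    · rw [show encSt ("right", r, c) = ((1:Int), r, c) from rfl, (bStep_ob g br bc r c hob).2.1]
      rfl
    · rw [show encSt ("left", r, c) = ((3:Int), r, c) from rfl, (bStep_ob g br bc r c hob).2.2.1]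
      rfl
    · rw [show encSt ("down", r, c) = ((2:Int), r, c) from rfl, (bStep_ob g br bc r c hob).2.2.2]
      rfl
  · have hneg : (pvGetCell g r c == "#" || (r == br && c == bc)) = false := by
      cases hx : (pvGetCell g r c == "#" || (r == br && c == bc)) with
      | false => rfl
      | true => exact absurd (by simpa using hx) hob
    have hstep : pvStep (fun r c => pvGetCell g r c == "#" || (r == br && c == bc)) (d, r, c)
        = pvMove (d, r, c) := by
      simp only [pvStep, hneg]
      simp
    rw [hstep]
    rcases hd with h | h | h | h <;> subst h
    · exact (bStep_noob g br bc r c hob).1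
    · exact (bStep_noob g br bc r c hob).2.1
    · exact (bStep_noob g br bc r c hob).2.2.1
    · exact (bStep_noob g br bc r c hob).2.2.2

-- `loops` is true iff the string walk stays in bounds for its first n states
lemma bLoops_iff (g : List (List String)) (C' : Nat)
    (hrect : ∀ row ∈ g, row.length = C') (br bc : Nat)
    (hbr : br < g.length) (hbc : bc < C') :
    ∀ (n : Nat) (s : PvSt), pvDirOK s →
      (bLoops g (br : Int) (bc : Int) (g.length : Int) (C' : Int) n (encSt s) = true
        ↔ ∀ j < n, pvInB (g.length : Int) (C' : Int)
            ((pvStep (fun r c => pvGetCell (pvObstruct g br bc) r c == "#"))^[j] s)) := by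
  intro n
  induction n with
  | zero => intro s _; simp [bLoops]
  | succ k ih =>
    intro s hd
    have hcoord : (encSt s).2.1 = s.2.1 ∧ (encSt s).2.2 = s.2.2 := ⟨rfl, rfl⟩
    simp only [bLoops]
    by_cases hin : pvInB (g.length : Int) (C' : Int) s
    · rw [if_pos (by exact hin)]
      rw [bStep_enc g (br : Int) (bc : Int) s hd,
        pvStep_obst_agree g C' hrect br bc hbr hbc s hin]
      rw [ih _ (pvStep_dir _ s hd)]
      constructor
      · intro h j hj
        cases j with
        | zero => simpa using hin
        | succ j =>
          rw [Function.iterate_succ_apply]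
          exact h j (by omega)
      · intro h j hj
        have := h (j + 1) (by omega)
        rwa [Function.iterate_succ_apply] at this
    · rw [if_neg (by exact hin)]
      constructor
      · intro h; exact absurd h (by simp)
      · intro h
        exact absurd (by simpa using h 0 (by omega)) hin

-- per-candidate equality: A's seen-set walk returns 1 exactly when B's bounded walk reports a loop
lemma cand_eq (g : List (List String)) (C' : Nat)
    (hrect : ∀ row ∈ g, row.length = C') (br bc : Nat)
    (hbr : br < g.length) (hbc : bc < C') (s0 : PvSt) (hd : pvDirOK s0) :
    walkA (pvObstruct g br bc) (g.length : Int) (C' : Int) (4 * g.length * C' + 1) s0 PySem.Set.empty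
      = (if bLoops g (br : Int) (bc : Int) (g.length : Int) (C' : Int)
            (4 * g.length * C' + 1) (encSt s0) then (1 : Int) else 0) := by
  rw [walkA_eq_gwalkA]
  have hmem : ∀ n, pvInB (g.length : Int) (C' : Int)
      ((pvStep (fun r c => pvGetCell (pvObstruct g br bc) r c == "#"))^[n] s0) →
      (pvStep (fun r c => pvGetCell (pvObstruct g br bc) r c == "#"))^[n] s0
        ∈ pvT g.length C' :=
    fun n hn => mem_pvT g.length C' _ (pvIter_dir _ _ rfl s0 hd n) hn
  have hA := gwalkA_char (pvStep (fun r c => pvGetCell (pvObstruct g br bc) r c == "#"))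
    (g.length : Int) (C' : Int) (pvT g.length C') s0 hmem
    (4 * g.length * C' + 1) 0 PySem.Set.empty
    (by rw [pvT_card]; omega)
    (by intro x; simp [PySem.Set.empty])
    (by intro i j hij hj0; omega)
    (by intro j hj; omega)
  simp only [Function.iterate_zero_apply] at hA
  rw [hA, pvT_card]
  refine if_congr ?_ rfl rfl
  rw [bLoops_iff g C' hrect br bc hbr hbc _ s0 hd]
  constructor
  · intro h j hj
    exact h j (Finset.mem_Icc.mpr ⟨by omega, by omega⟩)
  · intro h j hj
    rw [Finset.mem_Icc] at hj
    exact h j (by omega)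

-- bStart is findDirection through the encoding
lemma bStartRow_eq (r : Int) : ∀ (row : List String) (c : Int),
    (PySem.List.enumerate row c).findSome? (fun q =>
        (arrowDir? q.2).map (fun d => (d, r, q.1)))
      = (fdRow r c row).map encSt := by
  intro row
  induction row with
  | nil => intro c; simp [PySem.List.enumerate_nil, fdRow]
  | cons cell rest ih =>
    intro c
    rw [PySem.List.enumerate_cons, List.findSome?_cons]
    simp only [fdRow]
    by_cases h1 : cell = "^"
    · simp [arrowDir?, h1, encSt, encD]
    by_cases h2 : cell = ">"
    · simp [arrowDir?, h1, h2, encSt, encD]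
    by_cases h3 : cell = "<"
    · simp [arrowDir?, h1, h2, h3, encSt, encD]
    by_cases h4 : cell = "v"
    · simp [arrowDir?, h1, h2, h3, h4, encSt, encD]
    simp only [arrowDir?]
    simp only [h1, h2, h3, h4, if_false]
    have hih := ih (c + 1)
    simp only [arrowDir?] at hih
    simpa [h1, h2, h3, h4] using hih

lemma bStartGrid_eq : ∀ (g : List (List String)) (r : Int),
    (PySem.List.enumerate g r).findSome? (fun p =>
        (PySem.List.enumerate p.2).findSome? (fun q =>
          (arrowDir? q.2).map (fun d => (d, p.1, q.1))))
      = (fdGrid r g).map encSt := by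
  intro g
  induction g with
  | nil => intro r; simp [PySem.List.enumerate_nil, fdGrid]
  | cons row rest ih =>
    intro r
    rw [PySem.List.enumerate_cons, List.findSome?_cons]
    simp only [fdGrid]
    rw [bStartRow_eq r row 0]
    cases hfd : fdRow r 0 row with
    | some s => simp
    | none => simp [ih]

lemma bStart_eq (g : List (List String)) : bStart g = (findDirection g).map encSt := by
  unfold bStart findDirection
  exact bStartGrid_eq g 0

lemma fdRow_isSome : ∀ (row : List String) (r c : Int),
    (∃ s ∈ row, s = "^" ∨ s = ">" ∨ s = "<" ∨ s = "v") → ∃ out, fdRow r c row = some out := by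
  intro row
  induction row with
  | nil => intro r c h; simp at h
  | cons cell rest ih =>
    intro r c h
    simp only [fdRow]
    by_cases h1 : cell = "^"
    · exact ⟨_, by rw [if_pos h1]⟩
    · by_cases h2 : cell = ">"
      · exact ⟨_, by rw [if_neg h1, if_pos h2]⟩
      · by_cases h3 : cell = "<"
        · exact ⟨_, by rw [if_neg h1, if_neg h2, if_pos h3]⟩
        · by_cases h4 : cell = "v"
          · exact ⟨_, by rw [if_neg h1, if_neg h2, if_neg h3, if_pos h4]⟩
          · rw [if_neg h1, if_neg h2, if_neg h3, if_neg h4]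
            apply ih
            obtain ⟨s, hs, hor⟩ := h
            rcases List.mem_cons.mp hs with he | hm
            · subst he; tauto
            · exact ⟨s, hm, hor⟩

lemma fdGrid_isSome : ∀ (g : List (List String)) (r : Int),
    (∃ row ∈ g, ∃ s ∈ row, s = "^" ∨ s = ">" ∨ s = "<" ∨ s = "v") →
    ∃ out, fdGrid r g = some out := by
  intro g
  induction g with
  | nil => intro r h; simp at h
  | cons row rest ih =>
    intro r h
    simp only [fdGrid]
    by_cases hrow : ∃ s ∈ row, s = "^" ∨ s = ">" ∨ s = "<" ∨ s = "v"
    · obtain ⟨out, hout⟩ := fdRow_isSome row r 0 hrow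
      exact ⟨out, by rw [hout]⟩
    · cases hfd : fdRow r 0 row with
      | some s => exact ⟨s, rfl⟩
      | none =>
        apply ih
        obtain ⟨row', hrow', hs⟩ := h
        rcases List.mem_cons.mp hrow' with he | hm
        · subst he; exact absurd hs hrow
        · exact ⟨row', hm, hs⟩

lemma fdRow_dir : ∀ (row : List String) (r c : Int) (out : PvSt),
    fdRow r c row = some out → pvDirOK out := by
  intro row
  induction row with
  | nil => intro r c out h; simp [fdRow] at h
  | cons cell rest ih =>
    intro r c out h
    simp only [fdRow] at h
    split_ifs at h <;> first
      | (injection h with h'; subst h'; simp [pvDirOK])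
      | exact ih _ _ _ h

lemma fdGrid_dir : ∀ (g : List (List String)) (r : Int) (out : PvSt),
    fdGrid r g = some out → pvDirOK out := by
  intro g
  induction g with
  | nil => intro r out h; simp [fdGrid] at h
  | cons row rest ih =>
    intro r out h
    simp only [fdGrid] at h
    cases hfd : fdRow r 0 row with
    | some s => rw [hfd] at h; injection h with h'; subst h'; exact fdRow_dir row r 0 _ hfd
    | none => rw [hfd] at h; exact ih _ _ h

-- A's nested candidate recursion equals B's map-sum over the candidate list, row level
lemma row_sum_eq (g : List (List String)) (C' : Nat)
    (hrect : ∀ row ∈ g, row.length = C') (s0 : PvSt)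
    (hfd : findDirection g = some s0) (hd : pvDirOK s0)
    (br : Nat) (hbr : br < g.length) :
    ∀ (cells : List String) (bc : Nat), (g[br]'hbr).drop bc = cells →
      aRow g (g.length : Int) (C' : Int) (4 * g.length * C' + 1) br bc cells
        = ((((PySem.List.enumerate cells (bc : Int)).filter
              (fun q => q.2 == "^" || q.2 == "X")).map
              (fun q => ((br : Int), q.1))).map (fun p =>
            if bLoops g p.1 p.2 (g.length : Int) (C' : Int)
                (4 * g.length * C' + 1) (encSt s0) then (1 : Int) else 0)).sum := by
  intro cells
  induction cells with
  | nil => intro bc _; simp [aRow, PySem.List.enumerate_nil]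
  | cons cell rest ih =>
    intro bc hdrop
    have hbc : bc < (g[br]'hbr).length := by
      by_contra hle
      rw [List.drop_eq_nil_of_le (by omega)] at hdrop
      exact List.cons_ne_nil _ _ hdrop.symm
    have hbcC : bc < C' := by rw [← hrect _ (List.getElem_mem hbr)]; exact hbc
    have hrest : (g[br]'hbr).drop (bc + 1) = rest := by
      have h1 : (g[br]'hbr).drop (bc + 1) = ((g[br]'hbr).drop bc).drop 1 := by
        rw [List.drop_drop]
      rw [h1, hdrop]; rfl
    have hcast : ((bc : Int) + 1) = ((bc + 1 : Nat) : Int) := by omega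
    rw [PySem.List.enumerate_cons, hcast]
    simp only [aRow, List.filter_cons]
    by_cases htrig : cell = "^" ∨ cell = "X"
    · rw [if_pos (by simpa using htrig)]
      simp only [List.map_cons, List.sum_cons]
      rw [ih (bc + 1) hrest]
      congr 1
      unfold aCandidate
      rw [if_pos htrig, hfd]
      exact cand_eq g C' hrect br bc hbr hbcC s0 hd
    · rw [if_neg (by simpa using htrig)]
      rw [ih (bc + 1) hrest]
      unfold aCandidate
      rw [if_neg htrig]
      simp

lemma grid_sum_eq (g : List (List String)) (C' : Nat)
    (hrect : ∀ row ∈ g, row.length = C') (s0 : PvSt)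
    (hfd : findDirection g = some s0) (hd : pvDirOK s0) :
    ∀ (rows : List (List String)) (br : Nat), g.drop br = rows →
      aGrid g (g.length : Int) (C' : Int) (4 * g.length * C' + 1) br rows
        = (((PySem.List.enumerate rows (br : Int)).flatMap (fun p =>
              ((PySem.List.enumerate p.2).filter
                (fun q => q.2 == "^" || q.2 == "X")).map
                (fun q => (p.1, q.1)))).map (fun p =>
            if bLoops g p.1 p.2 (g.length : Int) (C' : Int)
                (4 * g.length * C' + 1) (encSt s0) then (1 : Int) else 0)).sum := by
  intro rows
  induction rows with
  | nil => intro br _; simp [aGrid, PySem.List.enumerate_nil]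
  | cons row rest ih =>
    intro br hdrop
    have hbr : br < g.length := by
      by_contra hle
      rw [List.drop_eq_nil_of_le (by omega)] at hdrop
      exact List.cons_ne_nil _ _ hdrop.symm
    have hrow : g[br]'hbr = row := by
      have hq : g[br]? = some row := by
        rw [← List.head?_drop, hdrop]; rfl
      rw [List.getElem?_eq_getElem hbr] at hq
      exact Option.some.inj hq
    have hrest : g.drop (br + 1) = rest := by
      have h1 : g.drop (br + 1) = (g.drop br).drop 1 := by rw [List.drop_drop]
      rw [h1, hdrop]; rfl
    have hcast : ((br : Int) + 1) = ((br + 1 : Nat) : Int) := by omega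
    rw [PySem.List.enumerate_cons, hcast]
    simp only [aGrid, List.flatMap_cons, List.map_append, List.sum_append]
    rw [ih (br + 1) hrest]
    congr 1
    have := row_sum_eq g C' hrect s0 hfd hd br hbr ((g[br]'hbr).drop 0) 0 rfl
    rw [hrow] at this
    simpa [List.map_map] using this

-- candidate-absence transfer
lemma aRow_notrig (g : List (List String)) (R C : Int) (fuel : Nat) (br : Nat) :
    ∀ (cells : List String) (bc : Nat), (∀ s ∈ cells, ¬(s = "^" ∨ s = "X")) →
      aRow g R C fuel br bc cells = 0 := by
  intro cells
  induction cells with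
  | nil => intro bc _; rfl
  | cons cell rest ih =>
    intro bc h
    simp only [aRow, aCandidate]
    rw [if_neg (h cell (List.mem_cons_self)), ih (bc + 1) (fun s hs => h s (List.mem_cons_of_mem _ hs))]
    simp

lemma aGrid_notrig (g : List (List String)) (R C : Int) (fuel : Nat) :
    ∀ (rows : List (List String)) (br : Nat),
      (∀ row ∈ rows, ∀ s ∈ row, ¬(s = "^" ∨ s = "X")) →
      aGrid g R C fuel br rows = 0 := by
  intro rows
  induction rows with
  | nil => intro br _; rfl
  | cons row rest ih =>
    intro br h
    simp only [aGrid]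
    rw [aRow_notrig g R C fuel br row 0 (h row (List.mem_cons_self)),
      ih (br + 1) (fun r hr => h r (List.mem_cons_of_mem _ hr))]
    simp

lemma bCands_nil_iff (g : List (List String)) :
    bCands g = [] ↔ ¬ ∃ row ∈ g, ∃ s ∈ row, s = "^" ∨ s = "X" := by
  unfold bCands
  rw [List.flatMap_eq_nil_iff]
  constructor
  · rintro h ⟨row, hrow, s, hs, hor⟩
    obtain ⟨i, hi, hgi⟩ := List.getElem_of_mem hrow
    obtain ⟨j, hj, hrj⟩ := List.getElem_of_mem hs
    have hp := h ((0 : Int) + (i : Int), row)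
      ((PySem.List.mem_enumerate_iff _ _ _).mpr ⟨i, hi, by rw [hgi]⟩)
    rw [List.map_eq_nil_iff, List.filter_eq_nil_iff] at hp
    exact hp ((0 : Int) + (j : Int), s)
      ((PySem.List.mem_enumerate_iff _ _ _).mpr ⟨j, hj, by rw [hrj]⟩)
      (by rcases hor with h1 | h1 <;> simp [h1])
  · intro h p hp
    rw [List.map_eq_nil_iff, List.filter_eq_nil_iff]
    intro q hq
    obtain ⟨k, hk, hpk⟩ := (PySem.List.mem_enumerate_iff _ _ _).mp hp
    obtain ⟨j, hj, hqj⟩ := (PySem.List.mem_enumerate_iff _ _ _).mp hq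
    simp only [Bool.or_eq_true, beq_iff_eq]
    rintro (h1 | h1)
    · exact h ⟨p.2, by rw [hpk]; exact List.getElem_mem hk, q.2, by
        rw [hqj]; exact List.getElem_mem hj, Or.inl h1⟩
    · exact h ⟨p.2, by rw [hpk]; exact List.getElem_mem hk, q.2, by
        rw [hqj]; exact List.getElem_mem hj, Or.inr h1⟩

-- ===== VERDICT (by name: the statement is the Claim_ definition above) =====
theorem part_two_spec : Claim_equal_part_two := by
  intro grid _ hpre
  unfold Spec_part_two
  obtain ⟨hne, hcond⟩ := hpre
  cases grid with
  | nil => exact absurd rfl hne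
  | cons row0 rest =>
    simp only [part_two, part_two_alt]
    by_cases htrig : ∃ row ∈ (row0 :: rest), ∃ s ∈ row, s = "^" ∨ s = "X"
    · obtain ⟨hrect, harrow⟩ := hcond htrig
      have hrect' : ∀ row ∈ (row0 :: rest), row.length = row0.length := by
        simpa using hrect
      obtain ⟨s0, hfd0⟩ := fdGrid_isSome (row0 :: rest) 0
        (by
          obtain ⟨row, hrow, s, hs, hor⟩ := harrow
          exact ⟨row, hrow, s, hs, hor⟩)
      have hfd : findDirection (row0 :: rest) = some s0 := hfd0
      have hd : pvDirOK s0 := fdGrid_dir _ 0 _ hfd0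
      have hcne : bCands (row0 :: rest) ≠ [] := by
        rw [ne_eq, bCands_nil_iff]
        exact fun hn => hn htrig
      rw [if_neg (by simpa [List.isEmpty_iff] using hcne)]
      rw [bStart_eq, hfd]
      simp only [Option.map_some]
      have := grid_sum_eq (row0 :: rest) row0.length hrect' s0 hfd hd (row0 :: rest) 0 rfl
      rw [this]
      rfl
    · have hno : ∀ row ∈ (row0 :: rest), ∀ s ∈ row, ¬(s = "^" ∨ s = "X") := by
        intro row hrow s hs hor
        exact htrig ⟨row, hrow, s, hs, hor⟩
      rw [aGrid_notrig _ _ _ _ _ 0 hno]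
      rw [if_pos (by
        rw [List.isEmpty_iff, bCands_nil_iff]
        intro ⟨row, hrow, s, hs, hor⟩
        exact hno row hrow s hs hor)]
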